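-- pv_equiv track=rewrite | github.com/piecuch-group/ccpy | tests/test_spinadapt_guess.py | get_dimensions
-- ===== SOURCE A (Python) =====
-- def get_dimensions(noa, nob, norb):
--
--     nua = norb - noa
--     nub = norb - nob
--
--     n1a = 0
--     for a in range(nua):
--         for i in range(noa):
--             n1a += 1
--     n1b = 0
--     for a in range(nub):
--         for i in range(nob):
--             n1b += 1
--     n2a = 0
--     for a in range(nua):
--         for b in range(a + 1, nua):
--             for i in range(noa):
--                 for j in range(i + 1, noa):
--                     n2a += 1
--     n2b = 0
--     for a in range(nua):
--         for b in range(nub):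
--             for i in range(noa):
--                 for j in range(nob):
--                     n2b += 1
--     n2c = 0
--     for a in range(nub):
--         for b in range(a + 1, nub):
--             for i in range(nob):
--                 for j in range(i + 1, nob):
--                     n2c += 1
--
--     return n1a, n1b, n2a, n2b, n2c
-- ===== SOURCE B (Python) =====
-- def get_dimensions(noa, nob, norb):
--     # Closed-form counts: n*m singles, pair counts via C(n,2) = n*(n-1)//2.
--     nua = norb - noa
--     nub = norb - nob
--     o1, o2 = max(noa, 0), max(nob, 0)
--     u1, u2 = max(nua, 0), max(nub, 0)
--     c2 = lambda n: n * (n - 1) // 2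
--     return u1 * o1, u2 * o2, c2(u1) * c2(o1), u1 * u2 * o1 * o2, c2(u2) * c2(o2)
-- ===== Notes on version B (the rewrite author's own statement) =====
-- stated objective: simpler
-- what changed: Replaced the nested counting loops (up to 4 deep) by closed-form products and C(n,2)=n*(n-1)//2 formulas.
import Mathlib
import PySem

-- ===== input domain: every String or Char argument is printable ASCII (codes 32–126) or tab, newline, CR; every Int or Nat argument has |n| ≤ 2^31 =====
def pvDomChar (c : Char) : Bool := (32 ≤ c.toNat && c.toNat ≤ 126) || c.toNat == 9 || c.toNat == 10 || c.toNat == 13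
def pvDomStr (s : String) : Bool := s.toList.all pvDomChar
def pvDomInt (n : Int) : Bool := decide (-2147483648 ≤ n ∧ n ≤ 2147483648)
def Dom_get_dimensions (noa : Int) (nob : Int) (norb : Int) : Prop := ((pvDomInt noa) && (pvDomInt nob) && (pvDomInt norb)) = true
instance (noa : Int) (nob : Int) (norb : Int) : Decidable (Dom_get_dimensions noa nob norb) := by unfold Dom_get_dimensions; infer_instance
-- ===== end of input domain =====

-- B replaces A's nested counting loops by closed-form products and C(n,2) formulas.

-- ===== PORT A =====
def get_dimensions (noa : Int) (nob : Int) (norb : Int) : List Int :=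
  let nua := norb - noa
  let nub := norb - nob
  let n1a := (PySem.List.pyRange 0 nua 1).foldl (fun n1a _a =>
      (PySem.List.pyRange 0 noa 1).foldl (fun n1a _i => n1a + 1) n1a) 0
  let n1b := (PySem.List.pyRange 0 nub 1).foldl (fun n1b _a =>
      (PySem.List.pyRange 0 nob 1).foldl (fun n1b _i => n1b + 1) n1b) 0
  let n2a := (PySem.List.pyRange 0 nua 1).foldl (fun n2a a =>
      (PySem.List.pyRange (a + 1) nua 1).foldl (fun n2a _b =>
        (PySem.List.pyRange 0 noa 1).foldl (fun n2a i =>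
          (PySem.List.pyRange (i + 1) noa 1).foldl (fun n2a _j => n2a + 1) n2a) n2a) n2a) 0
  let n2b := (PySem.List.pyRange 0 nua 1).foldl (fun n2b _a =>
      (PySem.List.pyRange 0 nub 1).foldl (fun n2b _b =>
        (PySem.List.pyRange 0 noa 1).foldl (fun n2b _i =>
          (PySem.List.pyRange 0 nob 1).foldl (fun n2b _j => n2b + 1) n2b) n2b) n2b) 0
  let n2c := (PySem.List.pyRange 0 nub 1).foldl (fun n2c a =>
      (PySem.List.pyRange (a + 1) nub 1).foldl (fun n2c _b =>
        (PySem.List.pyRange 0 nob 1).foldl (fun n2c i =>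
          (PySem.List.pyRange (i + 1) nob 1).foldl (fun n2c _j => n2c + 1) n2c) n2c) n2c) 0
  [n1a, n1b, n2a, n2b, n2c]

-- ===== PORT B =====
def pyC2 (n : Int) : Int := PySem.Int.floordiv (n * (n - 1)) 2

def get_dimensions_alt (noa : Int) (nob : Int) (norb : Int) : List Int :=
  let nua := norb - noa
  let nub := norb - nob
  let o1 := max noa 0
  let o2 := max nob 0
  let u1 := max nua 0
  let u2 := max nub 0
  [u1 * o1, u2 * o2, pyC2 u1 * pyC2 o1, u1 * u2 * o1 * o2, pyC2 u2 * pyC2 o2]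

-- ===== PRECONDITION & SPEC =====
def Spec_get_dimensions (noa : Int) (nob : Int) (norb : Int) (out : List Int) : Prop := out = get_dimensions_alt noa nob norb
instance (noa : Int) (nob : Int) (norb : Int) (out : List Int) : Decidable (Spec_get_dimensions noa nob norb out) := by unfold Spec_get_dimensions; infer_instance

-- ===== CLAIM (what is proved, stated in full; the proofs are below) =====
def Claim_equal_get_dimensions : Prop := ∀ (noa : Int) (nob : Int) (norb : Int), Dom_get_dimensions noa nob norb → Spec_get_dimensions noa nob norb (get_dimensions noa nob norb)

-- ===== LEMMAS AND PROOFS =====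

-- closed form accumulated by the triangular loops: C(max m 0, 2)
def triI (m : Int) : Int := max m 0 * (max m 0 - 1) / 2

-- a range-loop adding a constant each step
theorem foldl_const_add (x y d c : Int) :
    (PySem.List.pyRange x y 1).foldl (fun acc _ => acc + d) c
      = c + ((y - x).toNat : Int) * d := by
  rw [PySem.List.foldl_add (g := fun _ => d)]
  simp [PySem.List.length_pyRange_one]

theorem nat_tri (k : Nat) : ((List.range k).map (fun j => k - 1 - j)).sum = k * (k - 1) / 2 := by
  have hb : ((List.range k).map (fun j => k - 1 - j)).sum = ∑ j ∈ Finset.range k, (k - 1 - j) :=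
    (Nat.add_zero _).symm
  rw [hb, Finset.sum_range_reflect (fun j => j) k, Finset.sum_range_id]

theorem cast_sum_nat (l : List Nat) : (l.map (fun (j : Nat) => (j : Int))).sum = (l.sum : Int) :=
  (Nat.cast_list_sum l).symm

-- the triangular sum  Σ_{a=0}^{m-1} (m - (a+1)) = C(m,2)
theorem sum_tri (m : Int) :
    ((PySem.List.pyRange 0 m 1).map (fun a => ((m - (a + 1)).toNat : Int))).sum = triI m := by
  rw [PySem.List.pyRange_one]
  have hk : (m - 0).toNat = m.toNat := by omega
  rw [hk, List.map_map]
  have h1 : (List.range m.toNat).map ((fun a => ((m - (a + 1)).toNat : Int)) ∘ fun k => (0 : Int) + ↑k)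
      = ((List.range m.toNat).map (fun j => m.toNat - 1 - j)).map (fun (j : Nat) => (j : Int)) := by
    rw [List.map_map]
    apply List.map_congr_left
    intro k hk'
    simp only [List.mem_range] at hk'
    simp only [Function.comp]
    congr 1
    omega
  rw [h1, cast_sum_nat, nat_tri]
  rcases Nat.eq_zero_or_pos m.toNat with h | h
  · have hmax : max m 0 = 0 := by omega
    simp [triI, h, hmax]
  · unfold triI
    have hmax : max m 0 = (m.toNat : Int) := by omega
    rw [hmax, Int.natCast_ediv]
    congr 1
    push_cast [Nat.cast_sub h]
    ring

theorem Ldouble (n m c : Int) :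
    (PySem.List.pyRange 0 n 1).foldl (fun acc _ =>
      (PySem.List.pyRange 0 m 1).foldl (fun a _ => a + 1) acc) c
      = c + (n.toNat : Int) * (m.toNat : Int) := by
  simp only [foldl_const_add]
  rw [show (n - 0).toNat = n.toNat from by omega, show (m - 0).toNat = m.toNat from by omega]
  ring

theorem Ltri (m c : Int) :
    (PySem.List.pyRange 0 m 1).foldl (fun acc i =>
      (PySem.List.pyRange (i + 1) m 1).foldl (fun a _ => a + 1) acc) c
      = c + triI m := by
  simp only [foldl_const_add, mul_one]
  rw [PySem.List.foldl_add (g := fun i => ((m - (i + 1)).toNat : Int)), sum_tri]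

theorem Llin (n d c : Int) :
    (PySem.List.pyRange 0 n 1).foldl (fun acc a => acc + ((n - (a + 1)).toNat : Int) * d) c
      = c + triI n * d := by
  rw [PySem.List.foldl_add (g := fun a => ((n - (a + 1)).toNat : Int) * d)]
  rw [List.sum_map_mul_right, sum_tri]

theorem Lq2a (n m c : Int) :
    (PySem.List.pyRange 0 n 1).foldl (fun acc a =>
      (PySem.List.pyRange (a + 1) n 1).foldl (fun acc _ =>
        (PySem.List.pyRange 0 m 1).foldl (fun acc i =>
          (PySem.List.pyRange (i + 1) m 1).foldl (fun a2 _ => a2 + 1) acc) acc) acc) c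
      = c + triI n * triI m := by
  simp only [Ltri]
  simp only [foldl_const_add]
  rw [Llin]

theorem Lq2b (n p m q c : Int) :
    (PySem.List.pyRange 0 n 1).foldl (fun acc _ =>
      (PySem.List.pyRange 0 p 1).foldl (fun acc _ =>
        (PySem.List.pyRange 0 m 1).foldl (fun acc _ =>
          (PySem.List.pyRange 0 q 1).foldl (fun a2 _ => a2 + 1) acc) acc) acc) c
      = c + (n.toNat : Int) * ((p.toNat : Int) * ((m.toNat : Int) * (q.toNat : Int))) := by
  simp only [Ldouble]
  simp only [foldl_const_add]
  rw [show (n - 0).toNat = n.toNat from by omega, show (p - 0).toNat = p.toNat from by omega]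

theorem pyC2_max (m : Int) : pyC2 (max m 0) = triI m := by
  unfold pyC2 triI
  rw [PySem.Int.floordiv_eq_ediv_of_pos (by norm_num)]

-- ===== VERDICT (by name: the statement is the Claim_ definition above) =====
theorem get_dimensions_spec : Claim_equal_get_dimensions := by
  intro noa nob norb _
  unfold Spec_get_dimensions
  show [(PySem.List.pyRange 0 (norb - noa) 1).foldl (fun n1a _a =>
          (PySem.List.pyRange 0 noa 1).foldl (fun n1a _i => n1a + 1) n1a) 0,
        (PySem.List.pyRange 0 (norb - nob) 1).foldl (fun n1b _a =>
          (PySem.List.pyRange 0 nob 1).foldl (fun n1b _i => n1b + 1) n1b) 0,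
        (PySem.List.pyRange 0 (norb - noa) 1).foldl (fun n2a a =>
          (PySem.List.pyRange (a + 1) (norb - noa) 1).foldl (fun n2a _b =>
            (PySem.List.pyRange 0 noa 1).foldl (fun n2a i =>
              (PySem.List.pyRange (i + 1) noa 1).foldl (fun n2a _j => n2a + 1) n2a) n2a) n2a) 0,
        (PySem.List.pyRange 0 (norb - noa) 1).foldl (fun n2b _a =>
          (PySem.List.pyRange 0 (norb - nob) 1).foldl (fun n2b _b =>
            (PySem.List.pyRange 0 noa 1).foldl (fun n2b _i =>
              (PySem.List.pyRange 0 nob 1).foldl (fun n2b _j => n2b + 1) n2b) n2b) n2b) 0,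
        (PySem.List.pyRange 0 (norb - nob) 1).foldl (fun n2c a =>
          (PySem.List.pyRange (a + 1) (norb - nob) 1).foldl (fun n2c _b =>
            (PySem.List.pyRange 0 nob 1).foldl (fun n2c i =>
              (PySem.List.pyRange (i + 1) nob 1).foldl (fun n2c _j => n2c + 1) n2c) n2c) n2c) 0]
      = get_dimensions_alt noa nob norb
  rw [Ldouble, Ldouble, Lq2a, Lq2b, Lq2a]
  have halt : get_dimensions_alt noa nob norb
      = [max (norb - noa) 0 * max noa 0,
         max (norb - nob) 0 * max nob 0,
         triI (norb - noa) * triI noa,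
         max (norb - noa) 0 * max (norb - nob) 0 * max noa 0 * max nob 0,
         triI (norb - nob) * triI nob] := by
    show [max (norb - noa) 0 * max noa 0,
          max (norb - nob) 0 * max nob 0,
          pyC2 (max (norb - noa) 0) * pyC2 (max noa 0),
          max (norb - noa) 0 * max (norb - nob) 0 * max noa 0 * max nob 0,
          pyC2 (max (norb - nob) 0) * pyC2 (max nob 0)] = _
    rw [pyC2_max, pyC2_max, pyC2_max, pyC2_max]
  rw [halt]
  have h1 : ((norb - noa).toNat : Int) = max (norb - noa) 0 := by omega
  have h2 : ((norb - nob).toNat : Int) = max (norb - nob) 0 := by omega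
  have h3 : (noa.toNat : Int) = max noa 0 := by omega
  have h4 : (nob.toNat : Int) = max nob 0 := by omega
  rw [h1, h2, h3, h4]
  simp only [List.cons.injEq]
  refine ⟨by ring, by ring, by ring, by ring, by ring, trivial⟩
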